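-- pv_equiv track=rewrite | github.com/8n8/trumat | rules.py | mark_empty_lists
-- ===== SOURCE A (Python) =====
-- def mark_empty_lists(old):
--     new = ""
--
--     i = 0
--     while i < len(old):
--         if old[i] == "[":
--             j = i + 1
--             try:
--                 while old[j] == " " or old[j] == "\n":
--                     j += 1
--
--                 if old[j] == "]":
--                     new += "E"
--                     j += 1
--                     i = j
--                     continue
--
--             except IndexError:
--                 pass
--
--         new += old[i]
--         i += 1
--
--     return new, None
-- ===== SOURCE B (Python) =====
-- import re
--
-- def mark_empty_lists(old):
--     return re.sub(r"\[[ \n]*\]", "E", old), None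
-- ===== Notes on version B (the rewrite author's own statement) =====
-- stated objective: idiomatic
-- what changed: Replaces the hand-rolled index/while scanner with try/except and repeated string concatenation by a single regular-expression substitution that rewrites each bracket pair enclosing only spaces and newlines to the letter E, in one C-level pass.
import Mathlib
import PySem

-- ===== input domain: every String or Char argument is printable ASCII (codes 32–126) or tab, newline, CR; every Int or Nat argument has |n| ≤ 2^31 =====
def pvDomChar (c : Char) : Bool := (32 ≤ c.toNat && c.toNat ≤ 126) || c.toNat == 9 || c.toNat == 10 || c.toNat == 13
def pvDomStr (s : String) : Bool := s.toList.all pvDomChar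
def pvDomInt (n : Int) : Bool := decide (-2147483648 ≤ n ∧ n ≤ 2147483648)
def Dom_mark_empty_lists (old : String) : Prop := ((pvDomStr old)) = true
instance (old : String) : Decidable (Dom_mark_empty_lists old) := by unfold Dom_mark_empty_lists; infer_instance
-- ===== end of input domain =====

-- B replaces A's hand-rolled index scanner (try/except, string +=) by a single regex
-- substitution replacing each bracket pair enclosing only spaces/newlines with 'E' (idiomatic).

-- ===== PORT A =====
-- inner `while old[j] == " " or old[j] == "\n": j += 1`; stops at end of string,
-- where A's try/except catches the IndexError raised by the loop condition / the `]` test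
def pvSkipA (s : List Char) (j : Nat) : Nat :=
  if h : j < s.length then
    if s[j] = ' ' ∨ s[j] = '\n' then pvSkipA s (j + 1) else j
  else j
termination_by s.length - j

theorem pvSkipA_ge (s : List Char) (j : Nat) : j ≤ pvSkipA s j := by
  unfold pvSkipA
  split
  · split
    · exact le_trans (Nat.le_succ j) (pvSkipA_ge s (j + 1))
    · exact le_refl j
  · exact le_refl j
termination_by s.length - j

-- the outer `while i < len(old)` loop, accumulating `new`
def pvGoA (s : List Char) (i : Nat) (new : List Char) : List Char :=
  if h : i < s.length then
    if s[i] = '[' then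
      let j := pvSkipA s (i + 1)
      if hj : j < s.length then
        if s[j] = ']' then pvGoA s (j + 1) (new ++ ['E'])
        else pvGoA s (i + 1) (new ++ [s[i]])
      else pvGoA s (i + 1) (new ++ [s[i]])
    else pvGoA s (i + 1) (new ++ [s[i]])
  else new
termination_by s.length - i
decreasing_by
  · have := pvSkipA_ge s (i + 1); omega
  · omega
  · omega
  · omega

def mark_empty_lists (old : String) : String × Option String :=
  (String.mk (pvGoA old.toList 0 []), none)

-- ===== PORT B =====
-- hand port of Source B's re.sub: each leftmost, non-overlapping match of the pattern
-- (a '[', a run of spaces/newlines, a ']') is replaced by 'E'; exact for this pattern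
def pvSubB : List Char → List Char
  | [] => []
  | c :: t =>
    if c = '[' then
      let rest := t.dropWhile (fun d => d = ' ' || d = '\n')
      if rest.head? = some ']' then 'E' :: pvSubB rest.tail
      else c :: pvSubB t
    else c :: pvSubB t
termination_by s => s.length
decreasing_by
  · have h1 : (t.dropWhile (fun d => d = ' ' || d = '\n')).length ≤ t.length :=
      List.length_dropWhile_le _ _
    have h2 := List.length_tail (l := t.dropWhile (fun d => d = ' ' || d = '\n'))
    simp at h2 ⊢; omega
  · simp
  · simp

def mark_empty_lists_alt (old : String) : String × Option String :=
  (String.mk (pvSubB old.toList), none)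

-- ===== PRECONDITION & SPEC =====
def Spec_mark_empty_lists (old : String) (out : String × Option String) : Prop := out = mark_empty_lists_alt old
instance (old : String) (out : String × Option String) : Decidable (Spec_mark_empty_lists old out) := by unfold Spec_mark_empty_lists; infer_instance

-- ===== CLAIM (what is proved, stated in full; the proofs are below) =====
def Claim_equal_mark_empty_lists : Prop := ∀ (old : String), Dom_mark_empty_lists old → Spec_mark_empty_lists old (mark_empty_lists old)

-- ===== LEMMAS AND PROOFS =====

theorem pvDropWhile_eq_drop (p : Char → Bool) : ∀ l : List Char,
    l.dropWhile p = l.drop (l.takeWhile p).length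
  | [] => rfl
  | c :: t => by
    by_cases h : p c
    · simp [List.dropWhile_cons, List.takeWhile_cons, h, pvDropWhile_eq_drop p t]
    · simp [List.dropWhile_cons, List.takeWhile_cons, h]

theorem pvSkipA_spec (s : List Char) (j : Nat) :
    pvSkipA s j = j + ((s.drop j).takeWhile (fun d => d = ' ' || d = '\n')).length := by
  unfold pvSkipA
  split
  · rename_i h
    have hd : s.drop j = s[j] :: s.drop (j + 1) := List.drop_eq_getElem_cons h
    split
    · rename_i hws
      rw [pvSkipA_spec s (j + 1), hd, List.takeWhile_cons]
      have hb : (decide (s[j] = ' ') || decide (s[j] = '\n')) = true := by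
        rcases hws with h1 | h1 <;> simp [h1]
      rw [hb, if_pos rfl]
      simp; omega
    · rename_i hws
      push_neg at hws
      rw [hd, List.takeWhile_cons]
      have hb : (decide (s[j] = ' ') || decide (s[j] = '\n')) = false := by
        simp [hws.1, hws.2]
      rw [hb]
      simp
  · rename_i h
    rw [List.drop_eq_nil_of_le (by omega)]
    simp
termination_by s.length - j

theorem pvGoA_spec (n : Nat) (s : List Char) (i : Nat) (new : List Char)
    (hn : s.length - i ≤ n) :
    pvGoA s i new = new ++ pvSubB (s.drop i) := by
  induction n generalizing i new with
  | zero =>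
    rw [pvGoA, dif_neg (by omega), List.drop_eq_nil_of_le (by omega), pvSubB]
    simp
  | succ n ih =>
    by_cases h : i < s.length
    · have hd : s.drop i = s[i] :: s.drop (i + 1) := List.drop_eq_getElem_cons h
      by_cases hb : s[i] = '['
      · set j := pvSkipA s (i + 1) with hj
        have hjs : j = (i + 1) + ((s.drop (i + 1)).takeWhile (fun d => d = ' ' || d = '\n')).length :=
          pvSkipA_spec s (i + 1)
        have hdw : (s.drop (i + 1)).dropWhile (fun d => d = ' ' || d = '\n') = s.drop j := by
          rw [pvDropWhile_eq_drop, List.drop_drop]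
          congr 1; omega
        have hge : i + 1 ≤ j := pvSkipA_ge s (i + 1)
        rw [hd, pvSubB, if_pos hb]
        simp only [hdw]
        by_cases hjl : j < s.length
        · have hdj : s.drop j = s[j] :: s.drop (j + 1) := List.drop_eq_getElem_cons hjl
          by_cases hbr : s[j] = ']'
          · rw [pvGoA, dif_pos h, if_pos hb, ← hj, dif_pos hjl, if_pos hbr]
            rw [ih (j + 1) (new ++ ['E']) (by omega), hdj, hbr]
            simp
          · rw [pvGoA, dif_pos h, if_pos hb, ← hj, dif_pos hjl, if_neg hbr]
            rw [ih (i + 1) (new ++ [s[i]]) (by omega), hdj]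
            have hne : (s[j] :: s.drop (j + 1)).head? ≠ some ']' := by
              simp only [List.head?_cons]
              intro hc; exact hbr (Option.some.inj hc)
            rw [if_neg hne]
            simp [hb]
        · rw [pvGoA, dif_pos h, if_pos hb, ← hj, dif_neg hjl]
          rw [ih (i + 1) (new ++ [s[i]]) (by omega)]
          rw [show s.drop j = [] from List.drop_eq_nil_of_le (by omega)]
          simp [hb]
      · rw [pvGoA, dif_pos h, if_neg hb, hd, pvSubB, if_neg hb]
        rw [ih (i + 1) (new ++ [s[i]]) (by omega)]
        simp
    · rw [pvGoA, dif_neg h, List.drop_eq_nil_of_le (by omega), pvSubB]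
      simp

-- ===== VERDICT (by name: the statement is the Claim_ definition above) =====
theorem mark_empty_lists_spec : Claim_equal_mark_empty_lists := by
  intro old _
  unfold Spec_mark_empty_lists mark_empty_lists mark_empty_lists_alt
  rw [pvGoA_spec old.toList.length old.toList 0 [] (by omega)]
  simp
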